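-- pv_equiv track=rewrite | github.com/WhenLifeHandsYouLemons/LED-Light-Wall | pygame_code.py | precomputeRipple
-- ===== SOURCE A (Python) =====
-- board_width = 30
--
-- board_height = 20
--
-- def precomputeRipple(x, y, duration):   # duration is how many ticks the wave goes for (starts from 1)
--     # Each top-level item is each tick of the wave
--     # Each array in the top-level is the list of LEDs that have to be turned on for that tick
--     # Each LED contains an array that has its x and y coordinates
--     # Example = precomputed_wave = [
--     #                               [[LED1_x, LED1_y]],
--     #                               [[LED2_x, LED2_y], [LED3_x, LED3_y]],
--     #                               [[LED4_x, LED4_y], [LED5_x, LED5_y], [LED6_x, LED6_y]],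
--     #                               [[LED7_x, LED7_y], [LED8_x, LED8_y], [LED9_x, LED9_y]]
--     # ]
--     precomputed_wave = []
--
--     # First tick is hardcoded
--     precomputed_wave.append([[x, y]])
--
--     # Store every LED coordinate that has been used for easier searching
--     used_leds = [[x, y]]
--
--     # For every tick needed (value of duration)
--     for tick in range(1, duration):   # Starts from 1 as we already know what tick 0 is
--         tick_array = []
--         # Get the previous tick array to calculate next tick
--         previous_tick_array = precomputed_wave[tick-1]
--
--         # For every LED in the previous tick array
--         for i in previous_tick_array:
--             # Get the separate x and y values to change it
--             i_x = i[0]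
--             i_y = i[1]
--
--             # Check if the LED to the left of it is in any of the previous arrays
--             if [i_x - 1, i_y] not in used_leds and i_x - 1 >= 0:
--                 # Add it to tick_array
--                 tick_array.append([i_x - 1, i_y])
--                 # Add to used_leds
--                 used_leds.append([i_x - 1, i_y])
--
--             # Check if the LED to the right of it is in any of the previous arrays
--             if [i_x + 1, i_y] not in used_leds and i_x + 1 < board_width:
--                 # Add it to tick_array
--                 tick_array.append([i_x + 1, i_y])
--                 # Add to used_leds
--                 used_leds.append([i_x + 1, i_y])
--                 # If not, then add that to the tick_array
--
--             # Check if the LED above it is in any of the previous arrays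
--             if [i_x, i_y + 1] not in used_leds and i_y + 1 < board_height:
--                 # Add it to tick_array
--                 tick_array.append([i_x, i_y + 1])
--                 # Add to used_leds
--                 used_leds.append([i_x, i_y + 1])
--
--             # Check if the LED under it is in any of the previous arrays
--             if [i_x, i_y - 1] not in used_leds and i_y - 1 >= 0:
--                 # Add it to tick_array
--                 tick_array.append([i_x, i_y - 1])
--                 # Add to used_leds
--                 used_leds.append([i_x, i_y - 1])
--
--         # Add tick_array to precomputed_wave
--         precomputed_wave.append(tick_array)
--
--     return precomputed_wave
-- ===== SOURCE B (Python) =====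
-- board_width = 30
--
-- board_height = 20
--
-- def precomputeRipple(x, y, duration):
--     # Single-pass BFS with a FIFO queue of (cx, cy, tick); cells are recorded in
--     # pop (= discovery) order and grouped by tick at the end.
--     ticks = duration if duration > 1 else 1
--     queue = [(x, y, 0)]
--     visited = {(x, y)}
--     order = []
--     head = 0
--     while head < len(queue):
--         cx, cy, t = queue[head]
--         head += 1
--         order.append((cx, cy, t))
--         if t + 1 < ticks:
--             for nx, ny, ok in ((cx - 1, cy, cx - 1 >= 0),
--                                (cx + 1, cy, cx + 1 < board_width),
--                                (cx, cy + 1, cy + 1 < board_height),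
--                                (cx, cy - 1, cy - 1 >= 0)):
--                 if ok and (nx, ny) not in visited:
--                     visited.add((nx, ny))
--                     queue.append((nx, ny, t + 1))
--     return [[[cx, cy] for (cx, cy, t) in order if t == tick]
--             for tick in range(ticks)]
-- ===== Notes on version B (the rewrite author's own statement) =====
-- stated objective: alternative
-- what changed: Replaces A's tick-by-tick nested expansion (rebuilding each tick from the previous tick's list with a linear scan of used_leds for every membership test) by one single-pass FIFO BFS over (cell, tick) entries with an O(1)-lookup visited set, grouping the pops by tick at the end.
import Mathlib
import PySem

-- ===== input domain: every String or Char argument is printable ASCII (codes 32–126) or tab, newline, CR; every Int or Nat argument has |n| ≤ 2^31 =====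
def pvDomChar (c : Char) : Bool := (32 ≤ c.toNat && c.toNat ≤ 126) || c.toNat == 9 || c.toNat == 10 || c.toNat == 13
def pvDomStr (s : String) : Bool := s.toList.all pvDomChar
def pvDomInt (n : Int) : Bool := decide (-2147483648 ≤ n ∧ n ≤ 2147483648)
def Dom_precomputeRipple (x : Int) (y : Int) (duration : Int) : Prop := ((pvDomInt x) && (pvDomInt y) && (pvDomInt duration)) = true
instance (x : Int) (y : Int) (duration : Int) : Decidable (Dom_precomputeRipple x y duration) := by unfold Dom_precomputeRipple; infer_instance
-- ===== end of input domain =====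

-- B replaces A's nested tick-by-tick expansion (with a linear scan of used_leds for every
-- membership test) by one single-pass FIFO BFS with a visited hash set, grouping the pops by tick.

-- ===== PORT A =====
def boardWidth : Int := 30
def boardHeight : Int := 20

-- one neighbour check of A: "if cand not in used_leds and <bound>: append to tick_array and used_leds"
-- (s.1 = tick_array, s.2 = used_leds)
def checkNbr (s : List (List Int) × List (List Int)) (cand : List Int) (ok : Bool) :
    List (List Int) × List (List Int) :=
  if !(s.2.contains cand) && ok then (s.1 ++ [cand], s.2 ++ [cand]) else s

-- the body of A's "for i in previous_tick_array" loop: the four if-blocks, in A's order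
def rippleCell (s : List (List Int) × List (List Int)) (i : List Int) :
    List (List Int) × List (List Int) :=
  let ix := PySem.List.pyGetD i 0 0
  let iy := PySem.List.pyGetD i 1 0
  checkNbr (checkNbr (checkNbr (checkNbr s
    [ix - 1, iy] (decide (ix - 1 ≥ 0)))
    [ix + 1, iy] (decide (ix + 1 < boardWidth)))
    [ix, iy + 1] (decide (iy + 1 < boardHeight)))
    [ix, iy - 1] (decide (iy - 1 ≥ 0))

def precomputeRipple (x : Int) (y : Int) (duration : Int) : List (List (List Int)) :=
  -- state = (precomputed_wave, used_leds)
  ((PySem.List.pyRange 1 duration 1).foldl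
    (fun (st : List (List (List Int)) × List (List Int)) tick =>
      let prev := PySem.List.pyGetD st.1 (tick - 1) []   -- precomputed_wave[tick-1]; always in range
      let r := prev.foldl rippleCell ([], st.2)
      (st.1 ++ [r.1], r.2))
    ([[[x, y]]], [[x, y]])).1

-- ===== PORT B =====
-- try to enqueue one neighbour: bound check, visited check, mark visited on enqueue
def tryEnq (t1 : Int) (s : List (Int × Int × Int) × PySem.Set (Int × Int)) (ok : Bool)
    (p : Int × Int) : List (Int × Int × Int) × PySem.Set (Int × Int) :=
  if ok && !(PySem.Set.contains s.2 p) then (s.1 ++ [(p.1, p.2, t1)], PySem.Set.add s.2 p) else s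

-- Source B's "while head < len(queue)" loop: pending = queue[head:]; fuel only bounds the
-- number of pops (the port proves below it never runs out); returns the pop order.
def bfsLoop (fuel : Nat) (T : Int) (pending : List (Int × Int × Int))
    (visited : PySem.Set (Int × Int)) (order : List (Int × Int × Int)) :
    List (Int × Int × Int) :=
  match fuel, pending with
  | 0, _ => order
  | _ + 1, [] => order
  | f + 1, (cx, cy, t) :: rest =>
    let order := order ++ [(cx, cy, t)]
    if t + 1 < T then
      let s := tryEnq (t + 1) (rest, visited) (decide (cx - 1 ≥ 0)) (cx - 1, cy)
      let s := tryEnq (t + 1) s (decide (cx + 1 < boardWidth)) (cx + 1, cy)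
      let s := tryEnq (t + 1) s (decide (cy + 1 < boardHeight)) (cx, cy + 1)
      let s := tryEnq (t + 1) s (decide (cy - 1 ≥ 0)) (cx, cy - 1)
      bfsLoop f T s.1 s.2 order
    else
      bfsLoop f T rest visited order

def precomputeRipple_alt (x : Int) (y : Int) (duration : Int) : List (List (List Int)) :=
  let T : Int := if duration > 1 then duration else 1
  let fuel : Nat := (2 * T.toNat + 2) ^ 2   -- upper bound on the number of pops (proved below)
  let order := bfsLoop fuel T [(x, y, 0)] (PySem.Set.ofList [(x, y)]) []
  (PySem.List.pyRange 0 T 1).map (fun tick =>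
    (order.filter (fun e => e.2.2 == tick)).map (fun e => [e.1, e.2.1]))

-- ===== PRECONDITION & SPEC =====
def Spec_precomputeRipple (x : Int) (y : Int) (duration : Int) (out : List (List (List Int))) : Prop := out = precomputeRipple_alt x y duration
instance (x : Int) (y : Int) (duration : Int) (out : List (List (List Int))) : Decidable (Spec_precomputeRipple x y duration out) := by unfold Spec_precomputeRipple; infer_instance

-- ===== CLAIM (what is proved, stated in full; the proofs are below) =====
def Claim_equal_precomputeRipple : Prop := ∀ (x : Int) (y : Int) (duration : Int), Dom_precomputeRipple x y duration → Spec_precomputeRipple x y duration (precomputeRipple x y duration)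

-- ===== LEMMAS AND PROOFS =====

-- ---- common level-by-level specification ----
def pairToCell (p : Int × Int) : List Int := [p.1, p.2]

def tagL (t : Int) (l : List (Int × Int)) : List (Int × Int × Int) :=
  l.map (fun p => (p.1, p.2, t))

def try1 (ok : Bool) (p : Int × Int) (s : List (Int × Int) × List (Int × Int)) :
    List (Int × Int) × List (Int × Int) :=
  if ok && !(PySem.Set.contains s.2 p) then (s.1 ++ [p], PySem.Set.add s.2 p) else s

def stepPair (s : List (Int × Int) × List (Int × Int)) (c : Int × Int) :
    List (Int × Int) × List (Int × Int) :=
  try1 (decide (c.2 - 1 ≥ 0)) (c.1, c.2 - 1)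
    (try1 (decide (c.2 + 1 < boardHeight)) (c.1, c.2 + 1)
      (try1 (decide (c.1 + 1 < boardWidth)) (c.1 + 1, c.2)
        (try1 (decide (c.1 - 1 ≥ 0)) (c.1 - 1, c.2) s)))

def lvl (x y : Int) : Nat → List (Int × Int) × List (Int × Int)
  | 0 => ([(x, y)], [(x, y)])
  | n + 1 => (lvl x y n).1.foldl stepPair ([], (lvl x y n).2)

def TN (d : Int) : Nat := (d - 1).toNat + 1

def waveSpec (x y : Int) (n : Nat) : List (List (List Int)) :=
  (List.range n).map (fun k => ((lvl x y k).1).map pairToCell)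

-- ---- generic accumulation facts ----
lemma try1_acc (ok : Bool) (p : Int × Int) (a b v : List (Int × Int)) :
    try1 ok p (a ++ b, v) = (a ++ (try1 ok p (b, v)).1, (try1 ok p (b, v)).2) := by
  unfold try1
  split_ifs <;> simp [List.append_assoc]

lemma stepPair_acc (c : Int × Int) (a b v : List (Int × Int)) :
    stepPair (a ++ b, v) c = (a ++ (stepPair (b, v) c).1, (stepPair (b, v) c).2) := by
  simp only [stepPair, try1_acc]

lemma stepPair_acc0 (c : Int × Int) (b v : List (Int × Int)) :
    stepPair (b, v) c = (b ++ (stepPair ([], v) c).1, (stepPair ([], v) c).2) := by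
  have := stepPair_acc c b [] v
  simpa using this

-- ---- A-side bridge ----
lemma contains_map_pairToCell (vis : List (Int × Int)) (a b : Int) :
    (vis.map pairToCell).contains [a, b] = PySem.Set.contains vis (a, b) := by
  by_cases h : (a, b) ∈ vis
  · have hm : [a, b] ∈ vis.map pairToCell := List.mem_map.2 ⟨(a, b), h, rfl⟩
    simp [List.contains_iff_mem, PySem.Set.contains_iff, h, hm]
  · have hm : [a, b] ∉ vis.map pairToCell := by
      intro hm
      obtain ⟨p, hp, he⟩ := List.mem_map.1 hm
      cases p with
      | mk pa pb =>
        obtain ⟨h1, h2⟩ : pa = a ∧ pb = b := by simpa [pairToCell] using he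
        exact h (h1 ▸ h2 ▸ hp)
    simp [List.contains_iff_mem, PySem.Set.contains_iff, h, hm]

lemma checkNbr_bridge (ta vis : List (Int × Int)) (a b : Int) (ok : Bool) :
    checkNbr (ta.map pairToCell, vis.map pairToCell) [a, b] ok
      = ((try1 ok (a, b) (ta, vis)).1.map pairToCell,
         (try1 ok (a, b) (ta, vis)).2.map pairToCell) := by
  unfold checkNbr try1
  by_cases h : (a, b) ∈ vis <;> cases ok <;>
    simp [contains_map_pairToCell, PySem.Set.add, PySem.Set.contains,
          List.contains_iff_mem, h, pairToCell]

lemma rippleCell_bridge (ta vis : List (Int × Int)) (c : Int × Int) :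
    rippleCell (ta.map pairToCell, vis.map pairToCell) (pairToCell c)
      = ((stepPair (ta, vis) c).1.map pairToCell, (stepPair (ta, vis) c).2.map pairToCell) := by
  show rippleCell (ta.map pairToCell, vis.map pairToCell) [c.1, c.2] = _
  unfold rippleCell
  simp only [PySem.List.pyGetD_zero_cons]
  rw [show PySem.List.pyGetD [c.1, c.2] 1 0 = c.2 by simp [pysem]]
  simp only [checkNbr_bridge]
  rfl

lemma foldA_bridge (cur : List (Int × Int)) : ∀ (ta vis : List (Int × Int)),
    (cur.map pairToCell).foldl rippleCell (ta.map pairToCell, vis.map pairToCell)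
      = ((cur.foldl stepPair (ta, vis)).1.map pairToCell,
         (cur.foldl stepPair (ta, vis)).2.map pairToCell) := by
  induction cur with
  | nil => intro ta vis; rfl
  | cons c cur ih =>
    intro ta vis
    simp only [List.map_cons, List.foldl_cons, rippleCell_bridge]
    simpa using ih (stepPair (ta, vis) c).1 (stepPair (ta, vis) c).2

lemma foldA_bridge0 (cur vis : List (Int × Int)) :
    (cur.map pairToCell).foldl rippleCell ([], vis.map pairToCell)
      = ((cur.foldl stepPair ([], vis)).1.map pairToCell,
         (cur.foldl stepPair ([], vis)).2.map pairToCell) := by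
  simpa using foldA_bridge cur [] vis

lemma portA_inv (x y : Int) (k : Nat) :
    (List.range k).foldl
      (fun (st : List (List (List Int)) × List (List Int)) (j : Nat) =>
        (st.1 ++ [((PySem.List.pyGetD st.1 (1 + (j : Int) - 1) []).foldl rippleCell ([], st.2)).1],
         ((PySem.List.pyGetD st.1 (1 + (j : Int) - 1) []).foldl rippleCell ([], st.2)).2))
      ([[[x, y]]], [[x, y]])
      = ((List.range (k + 1)).map (fun j => ((lvl x y j).1).map pairToCell),
         ((lvl x y k).2).map pairToCell) := by
  induction k with
  | zero => simp [lvl, pairToCell]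
  | succ k ih =>
    rw [List.range_succ, List.foldl_append, ih]
    have harith : (1 + (k : Int) - 1) = (k : Int) := by ring
    simp only [List.foldl_cons, List.foldl_nil, harith, PySem.List.pyGetD_natCast]
    rw [PySem.List.getD_map_range _ _ _ _ (Nat.lt_succ_self k)]
    rw [foldA_bridge0]
    have hl : (lvl x y (k + 1)) = ((lvl x y k).1).foldl stepPair ([], (lvl x y k).2) := rfl
    rw [← hl]
    rw [show List.range (k + 1 + 1) = List.range (k + 1) ++ [k + 1] from List.range_succ]
    simp

lemma portA_eq_waveSpec (x y d : Int) :
    precomputeRipple x y d = waveSpec x y (TN d) := by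
  unfold precomputeRipple
  rw [PySem.List.pyRange_one, List.foldl_map]
  exact congrArg Prod.fst (portA_inv x y ((d - 1).toNat))

-- ---- B-side bridge ----
lemma tagL_append (t : Int) (a b : List (Int × Int)) :
    tagL t (a ++ b) = tagL t a ++ tagL t b := by
  simp [tagL]

lemma tryEnq_acc (t1 : Int) (q : List (Int × Int × Int)) (ok : Bool) (p : Int × Int)
    (b v : List (Int × Int)) :
    tryEnq t1 (q ++ tagL t1 b, v) ok p
      = (q ++ tagL t1 (try1 ok p (b, v)).1, (try1 ok p (b, v)).2) := by
  unfold tryEnq try1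
  split_ifs <;> simp [tagL, List.append_assoc]

lemma bfsLoop_nil (f : Nat) (T : Int) (vis : List (Int × Int)) (order : List (Int × Int × Int)) :
    bfsLoop f T [] vis order = order := by
  cases f <;> rfl

lemma bfsLoop_pop (f : Nat) (T t : Int) (c : Int × Int) (rest : List (Int × Int × Int))
    (vis : List (Int × Int)) (order : List (Int × Int × Int)) (h : t + 1 < T) :
    bfsLoop (f + 1) T ((c.1, c.2, t) :: rest) vis order
      = bfsLoop f T (rest ++ tagL (t + 1) (stepPair ([], vis) c).1)
          (stepPair ([], vis) c).2 (order ++ [(c.1, c.2, t)]) := by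
  show (if t + 1 < T then _ else _) = _
  rw [if_pos h]
  have h0 : rest = rest ++ tagL (t + 1) ([] : List (Int × Int)) := by simp [tagL]
  rw [show (rest, vis) = (rest ++ tagL (t + 1) ([] : List (Int × Int)), vis) by simp [tagL]]
  simp only [tryEnq_acc]
  rfl

lemma bfsLoop_level (T t : Int) (h : t + 1 < T) (cur : List (Int × Int)) :
    ∀ (nxt vis : List (Int × Int)) (order : List (Int × Int × Int)) (f : Nat),
    bfsLoop (cur.length + f) T (tagL t cur ++ tagL (t + 1) nxt) vis order
      = bfsLoop f T (tagL (t + 1) (cur.foldl stepPair (nxt, vis)).1)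
          (cur.foldl stepPair (nxt, vis)).2 (order ++ tagL t cur) := by
  induction cur with
  | nil => intro nxt vis order f; simp [tagL]
  | cons c cur ih =>
    intro nxt vis order f
    have hlen : (c :: cur).length + f = (cur.length + f) + 1 := by
      simp [List.length_cons]; omega
    rw [hlen]
    have hq : tagL t (c :: cur) ++ tagL (t + 1) nxt
        = (c.1, c.2, t) :: (tagL t cur ++ tagL (t + 1) nxt) := by simp [tagL]
    rw [hq, bfsLoop_pop _ _ _ _ _ _ _ h]
    have hq2 : (tagL t cur ++ tagL (t + 1) nxt) ++ tagL (t + 1) (stepPair ([], vis) c).1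
        = tagL t cur ++ tagL (t + 1) (stepPair (nxt, vis) c).1 := by
      rw [stepPair_acc0 c nxt vis]
      simp [tagL_append, List.append_assoc]
    rw [hq2]
    have hv : (stepPair ([], vis) c).2 = (stepPair (nxt, vis) c).2 := by
      rw [stepPair_acc0 c nxt vis]
    rw [hv, ih (stepPair (nxt, vis) c).1 (stepPair (nxt, vis) c).2]
    simp [tagL, List.append_assoc, List.foldl_cons]

lemma bfsLoop_last (T t : Int) (h : ¬ t + 1 < T) (cur : List (Int × Int)) :
    ∀ (vis : List (Int × Int)) (order : List (Int × Int × Int)) (f : Nat),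
    bfsLoop (cur.length + f) T (tagL t cur) vis order = order ++ tagL t cur := by
  induction cur with
  | nil => intro vis order f; simp [tagL, bfsLoop_nil]
  | cons c cur ih =>
    intro vis order f
    have hlen : (c :: cur).length + f = (cur.length + f) + 1 := by
      simp [List.length_cons]; omega
    rw [hlen]
    have hq : tagL t (c :: cur) = (c.1, c.2, t) :: tagL t cur := by simp [tagL]
    rw [hq]
    show (if t + 1 < T then _ else _) = _
    rw [if_neg h, ih vis (order ++ [(c.1, c.2, t)]) f]
    simp [tagL, List.append_assoc]

-- total size of levels j, j+1, …, j+n-1 / their tagged concatenation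
def sizes (x y : Int) : Nat → Nat → Nat
  | _, 0 => 0
  | j, n + 1 => ((lvl x y j).1).length + sizes x y (j + 1) n

def chunk (x y : Int) : Nat → Nat → List (Int × Int × Int)
  | _, 0 => []
  | j, n + 1 => tagL (j : Int) ((lvl x y j).1) ++ chunk x y (j + 1) n

lemma sizes_succ (x y : Int) : ∀ (n j : Nat),
    sizes x y j (n + 1) = ((lvl x y j).1).length + sizes x y (j + 1) n := by
  intro n j; rfl

lemma bfsLoop_levels (x y : Int) (tn : Nat) : ∀ (n j : Nat), 1 ≤ n → j + n = tn →
    ∀ (order : List (Int × Int × Int)) (f : Nat),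
    bfsLoop (sizes x y j n + f) (tn : Int) (tagL (j : Int) ((lvl x y j).1)) ((lvl x y j).2) order
      = order ++ chunk x y j n := by
  intro n
  induction n with
  | zero => intro j h; omega
  | succ n ih =>
    intro j _ hj order f
    by_cases hn : n = 0
    · subst hn
      have hT : ¬ ((j : Int) + 1 < (tn : Int)) := by
        have : j + 1 = tn := by omega
        push_cast [← this]; omega
      have hs : sizes x y j 1 = ((lvl x y j).1).length := by simp [sizes]
      rw [hs, bfsLoop_last _ _ hT]
      simp [chunk]
    · have hT : (j : Int) + 1 < (tn : Int) := by
        have : j + 1 < tn := by omega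
        push_cast; omega
      rw [sizes_succ, Nat.add_assoc]
      have hq : tagL (j : Int) ((lvl x y j).1)
          = tagL (j : Int) ((lvl x y j).1) ++ tagL ((j : Int) + 1) ([] : List (Int × Int)) := by
        simp [tagL]
      rw [hq, bfsLoop_level _ _ hT]
      have hl : ((lvl x y j).1).foldl stepPair ([], (lvl x y j).2) = lvl x y (j + 1) := rfl
      rw [hl]
      have hc : ((j : Int) + 1) = ((j + 1 : Nat) : Int) := by push_cast; ring
      rw [hc, ih (j + 1) (by omega) (by omega)]
      simp [chunk, List.append_assoc]

-- ---- fuel sufficiency ----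
lemma try1_inv (ok : Bool) (p : Int × Int) (v0 : List (Int × Int))
    (s : List (Int × Int) × List (Int × Int)) (h : s.2 = v0 ++ s.1) :
    (try1 ok p s).2 = v0 ++ (try1 ok p s).1 := by
  unfold try1
  split_ifs with hc
  · simp only [Bool.and_eq_true, Bool.not_eq_true'] at hc
    have hp : p ∉ s.2 := by
      intro hm
      have hx := (PySem.Set.contains_iff s.2 p).mpr hm
      rw [hc.2] at hx
      exact absurd hx (by simp)
    rw [h] at hp
    simp only [List.mem_append] at hp
    push_neg at hp
    simp [PySem.Set.add, hc.2, h, List.append_assoc]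
    exact hp
  · exact h

lemma stepPair_inv (c : Int × Int) (v0 : List (Int × Int))
    (s : List (Int × Int) × List (Int × Int)) (h : s.2 = v0 ++ s.1) :
    (stepPair s c).2 = v0 ++ (stepPair s c).1 := by
  unfold stepPair
  exact try1_inv _ _ _ _ (try1_inv _ _ _ _ (try1_inv _ _ _ _ (try1_inv _ _ _ _ h)))

lemma vis_snd_eq (cur : List (Int × Int)) : ∀ (s : List (Int × Int) × List (Int × Int))
    (v0 : List (Int × Int)), s.2 = v0 ++ s.1 →
    (cur.foldl stepPair s).2 = v0 ++ (cur.foldl stepPair s).1 := by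
  induction cur with
  | nil => intro s v0 h; exact h
  | cons c cur ih => intro s v0 h; exact ih (stepPair s c) v0 (stepPair_inv c v0 s h)

lemma vis_append (x y : Int) (n : Nat) :
    (lvl x y (n + 1)).2 = (lvl x y n).2 ++ (lvl x y (n + 1)).1 := by
  exact vis_snd_eq ((lvl x y n).1) ([], (lvl x y n).2) ((lvl x y n).2) (by simp)

lemma sizes_succ_right (x y : Int) : ∀ (n j : Nat),
    sizes x y j (n + 1) = sizes x y j n + ((lvl x y (j + n)).1).length := by
  intro n
  induction n with
  | zero => intro j; simp [sizes]
  | succ n ih =>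
    intro j
    calc sizes x y j (n + 1 + 1)
        = ((lvl x y j).1).length + sizes x y (j + 1) (n + 1) := rfl
      _ = ((lvl x y j).1).length
            + (sizes x y (j + 1) n + ((lvl x y (j + 1 + n)).1).length) := by rw [ih (j + 1)]
      _ = sizes x y j (n + 1) + ((lvl x y (j + (n + 1))).1).length := by
            rw [show j + 1 + n = j + (n + 1) from by omega, sizes_succ]; omega

lemma sizes_eq_vis_len (x y : Int) : ∀ (n : Nat),
    sizes x y 0 (n + 1) = ((lvl x y n).2).length := by
  intro n
  induction n with
  | zero => simp [sizes, lvl]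
  | succ n ih =>
    rw [sizes_succ_right, ih, vis_append x y n, List.length_append]
    simp

lemma try1_nodup (ok : Bool) (p : Int × Int) (s : List (Int × Int) × List (Int × Int))
    (h : s.2.Nodup) : ((try1 ok p s).2).Nodup := by
  unfold try1
  split_ifs with hc
  · simp only [Bool.and_eq_true, Bool.not_eq_true'] at hc
    have hp : p ∉ s.2 := by
      intro hm
      have hx := (PySem.Set.contains_iff s.2 p).mpr hm
      rw [hc.2] at hx
      exact absurd hx (by simp)
    simp [PySem.Set.add, hc.2]
    rw [if_neg hp]
    simp [List.nodup_append, h]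
    intro a b hab he
    exact hp (he ▸ hab)
  · exact h

lemma stepPair_nodup (c : Int × Int) (s : List (Int × Int) × List (Int × Int))
    (h : s.2.Nodup) : ((stepPair s c).2).Nodup := by
  unfold stepPair
  exact try1_nodup _ _ _ (try1_nodup _ _ _ (try1_nodup _ _ _ (try1_nodup _ _ _ h)))

lemma foldl_nodup (cur : List (Int × Int)) : ∀ (s : List (Int × Int) × List (Int × Int)),
    s.2.Nodup → ((cur.foldl stepPair s).2).Nodup := by
  induction cur with
  | nil => intro s h; exact h
  | cons c cur ih => intro s h; exact ih (stepPair s c) (stepPair_nodup c s h)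

lemma vis_nodup (x y : Int) : ∀ (n : Nat), ((lvl x y n).2).Nodup := by
  intro n
  induction n with
  | zero => simp [lvl]
  | succ n ih => exact foldl_nodup ((lvl x y n).1) ([], (lvl x y n).2) ih

lemma try1_snd_sub (ok : Bool) (p q : Int × Int) (s : List (Int × Int) × List (Int × Int))
    (h : q ∈ (try1 ok p s).2) : q ∈ s.2 ∨ q = p := by
  unfold try1 at h
  split_ifs at h with hc
  · simp only [PySem.Set.add] at h
    split_ifs at h with hc2
    · exact Or.inl h
    · rcases List.mem_append.1 h with h | h
      · exact Or.inl h
      · exact Or.inr (by simpa using h)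
  · exact Or.inl h

def nbrOf (c q : Int × Int) : Prop :=
  q = (c.1 - 1, c.2) ∨ q = (c.1 + 1, c.2) ∨ q = (c.1, c.2 + 1) ∨ q = (c.1, c.2 - 1)

lemma stepPair_snd_sub (c q : Int × Int) (s : List (Int × Int) × List (Int × Int))
    (h : q ∈ (stepPair s c).2) : q ∈ s.2 ∨ nbrOf c q := by
  unfold stepPair at h
  rcases try1_snd_sub _ _ _ _ h with h | hq
  · rcases try1_snd_sub _ _ _ _ h with h | hq
    · rcases try1_snd_sub _ _ _ _ h with h | hq
      · rcases try1_snd_sub _ _ _ _ h with h | hq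
        · exact Or.inl h
        · exact Or.inr (by simp [nbrOf, hq])
      · exact Or.inr (by simp [nbrOf, hq])
    · exact Or.inr (by simp [nbrOf, hq])
  · exact Or.inr (by simp [nbrOf, hq])

lemma foldl_snd_sub (cur : List (Int × Int)) : ∀ (s : List (Int × Int) × List (Int × Int))
    (q : Int × Int), q ∈ (cur.foldl stepPair s).2 → q ∈ s.2 ∨ ∃ c ∈ cur, nbrOf c q := by
  induction cur with
  | nil => intro s q h; exact Or.inl h
  | cons c cur ih =>
    intro s q h
    rcases ih (stepPair s c) q h with h | ⟨c', hc', hn⟩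
    · rcases stepPair_snd_sub c q s h with h | hn
      · exact Or.inl h
      · exact Or.inr ⟨c, List.mem_cons_self, hn⟩
    · exact Or.inr ⟨c', List.mem_cons_of_mem _ hc', hn⟩

lemma lvl_fst_sub_snd (x y : Int) (n : Nat) (c : Int × Int) (h : c ∈ (lvl x y n).1) :
    c ∈ (lvl x y n).2 := by
  cases n with
  | zero => simpa [lvl] using h
  | succ n => rw [vis_append x y n]; exact List.mem_append_right _ h

lemma vis_box (x y : Int) : ∀ (n : Nat) (q : Int × Int), q ∈ (lvl x y n).2 →
    |q.1 - x| ≤ (n : Int) ∧ |q.2 - y| ≤ (n : Int) := by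
  intro n
  induction n with
  | zero =>
    intro q hq
    obtain rfl : q = (x, y) := by simpa [lvl] using hq
    simp
  | succ n ih =>
    intro q hq
    rcases foldl_snd_sub _ _ _ hq with h | ⟨c, hc, hn⟩
    · obtain ⟨h1, h2⟩ := ih q h
      rw [abs_le] at h1 h2
      constructor <;> (rw [abs_le]; push_cast at h1 h2 ⊢; omega)
    · obtain ⟨h1, h2⟩ := ih c (lvl_fst_sub_snd x y n c hc)
      rw [abs_le] at h1 h2
      push_cast at h1 h2
      rcases hn with rfl | rfl | rfl | rfl <;>
        (constructor <;> (rw [abs_le]; push_cast; simp; omega))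

lemma nodup_box_len (l : List (Int × Int)) (x y : Int) (r : Nat) (hnd : l.Nodup)
    (hbox : ∀ q ∈ l, |q.1 - x| ≤ (r : Int) ∧ |q.2 - y| ≤ (r : Int)) :
    l.length ≤ (2 * r + 1) ^ 2 := by
  have hsub : l.toFinset ⊆ (Finset.Icc (x - r) (x + r)) ×ˢ (Finset.Icc (y - r) (y + r)) := by
    intro q hq
    rw [List.mem_toFinset] at hq
    obtain ⟨h1, h2⟩ := hbox q hq
    rw [abs_le] at h1 h2
    rw [Finset.mem_product, Finset.mem_Icc, Finset.mem_Icc]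
    omega
  have hcard := Finset.card_le_card hsub
  rw [List.toFinset_card_of_nodup hnd, Finset.card_product, Int.card_Icc, Int.card_Icc] at hcard
  have h1 : (x + r + 1 - (x - r)).toNat = 2 * r + 1 := by omega
  have h2 : (y + r + 1 - (y - r)).toNat = 2 * r + 1 := by omega
  rw [h1, h2] at hcard
  calc l.length ≤ (2 * r + 1) * (2 * r + 1) := hcard
    _ = (2 * r + 1) ^ 2 := by ring

lemma fuel_enough (x y : Int) (tn : Nat) (h : 1 ≤ tn) :
    sizes x y 0 tn ≤ (2 * tn + 2) ^ 2 := by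
  obtain ⟨m, rfl⟩ : ∃ m, tn = m + 1 := ⟨tn - 1, by omega⟩
  rw [sizes_eq_vis_len]
  calc ((lvl x y m).2).length ≤ (2 * m + 1) ^ 2 :=
        nodup_box_len _ x y m (vis_nodup x y m) (vis_box x y m)
    _ ≤ (2 * (m + 1) + 2) ^ 2 := Nat.pow_le_pow_left (by omega) 2

-- ---- B result ----
lemma filter_tagL (i k : Nat) (l : List (Int × Int)) :
    (tagL (i : Int) l).filter (fun e => e.2.2 == (k : Int))
      = if i = k then tagL (i : Int) l else [] := by
  by_cases h : i = k
  · subst h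
    simp [tagL, List.filter_map, Function.comp_def]
  · simp [tagL, List.filter_map, Function.comp_def, h]

lemma chunk_filter_lt (x y : Int) : ∀ (n j k : Nat), k < j →
    (chunk x y j n).filter (fun e => e.2.2 == (k : Int)) = [] := by
  intro n
  induction n with
  | zero => intro j k _; simp [chunk]
  | succ n ih =>
    intro j k hk
    show ((tagL (j : Int) ((lvl x y j).1) ++ chunk x y (j + 1) n).filter _) = []
    rw [List.filter_append, filter_tagL, if_neg (by omega), ih (j + 1) k (by omega)]
    simp

lemma chunk_filter (x y : Int) : ∀ (n j k : Nat), j ≤ k → k < j + n →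
    (chunk x y j n).filter (fun e => e.2.2 == (k : Int)) = tagL (k : Int) ((lvl x y k).1) := by
  intro n
  induction n with
  | zero => intro j k h1 h2; omega
  | succ n ih =>
    intro j k h1 h2
    show ((tagL (j : Int) ((lvl x y j).1) ++ chunk x y (j + 1) n).filter _) = _
    rw [List.filter_append, filter_tagL]
    by_cases hj : j = k
    · subst hj
      rw [if_pos rfl, chunk_filter_lt x y n (j + 1) j (by omega)]
      simp
    · rw [if_neg hj, ih (j + 1) k (by omega) (by omega)]
      simp

lemma portB_eq_waveSpec (x y d : Int) :
    precomputeRipple_alt x y d = waveSpec x y (TN d) := by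
  simp only [precomputeRipple_alt]
  have hT : (if d > 1 then d else 1) = ((TN d : Nat) : Int) := by
    unfold TN; split <;> push_cast <;> omega
  rw [hT]
  have htn1 : 1 ≤ TN d := by unfold TN; omega
  have hfuel : (2 * ((TN d : Nat) : Int).toNat + 2) ^ 2
      = sizes x y 0 (TN d) + ((2 * TN d + 2) ^ 2 - sizes x y 0 (TN d)) := by
    rw [Int.toNat_natCast]
    exact (Nat.add_sub_cancel' (fuel_enough x y (TN d) htn1)).symm
  rw [hfuel]
  have hq0 : ([(x, y, (0 : Int))] : List (Int × Int × Int))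
      = tagL ((0 : Nat) : Int) ((lvl x y 0).1) := by simp [tagL, lvl]
  have hv0 : PySem.Set.ofList [(x, y)] = (lvl x y 0).2 := rfl
  rw [hq0, hv0,
    bfsLoop_levels x y (TN d) (TN d) 0 htn1 (by omega) [] ((2 * TN d + 2) ^ 2 - sizes x y 0 (TN d))]
  rw [PySem.List.pyRange_one]
  rw [show (((TN d : Nat) : Int) - 0).toNat = TN d by simp]
  rw [List.map_map]
  unfold waveSpec
  apply List.map_congr_left
  intro k hk
  rw [List.mem_range] at hk
  show ((([] ++ chunk x y 0 (TN d)).filter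
        (fun (e : Int × Int × Int) => e.2.2 == (0 + (k : Int)))).map
      (fun (e : Int × Int × Int) => [e.1, e.2.1])) = _
  rw [List.nil_append, show (0 + (k : Int)) = ((k : Nat) : Int) by simp,
    chunk_filter x y (TN d) 0 k (by omega) (by omega)]
  simp [tagL, pairToCell, List.map_map]

-- ===== VERDICT (by name: the statement is the Claim_ definition above) =====
theorem precomputeRipple_spec : Claim_equal_precomputeRipple := by
  intro x y d _
  unfold Spec_precomputeRipple
  rw [portA_eq_waveSpec, portB_eq_waveSpec]
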